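-- pv_equiv track=rewrite | github.com/ictcubeMENA/Training_one | codewars/6kyu/Tick toward/main.py | tick_toward
-- ===== SOURCE A (Python) =====
-- def tick_toward(start, target):
--     lst = [start]
--     n = max(abs(target[0]-start[0]),abs(target[1]-start[1]))
--     i = 0
--     while i < n:
--         if lst[i][0] < target[0]:
--             num0 = lst[i][0]+1
--         elif lst[i][0] > target[0]:
--             num0 = lst[i][0]-1
--         else:
--             num0 = lst[i][0]
--
--         if lst[i][1] < target[1]:
--             num_1 = lst[i][1]+1
--         elif lst[i][1] > target[1]:
--             num_1 = lst[i][1]-1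
--         else:
--             num_1 = lst[i][1]
--         lst.append((num0,num_1))
--         i += 1
--     return lst
-- ===== SOURCE B (Python) =====
-- def tick_toward(start, target):
--     dx = abs(target[0] - start[0])
--     dy = abs(target[1] - start[1])
--     sx = (target[0] > start[0]) - (target[0] < start[0])
--     sy = (target[1] > start[1]) - (target[1] < start[1])
--     n = max(dx, dy)
--     return [start] + [(start[0] + sx * min(i, dx), start[1] + sy * min(i, dy))
--                       for i in range(1, n + 1)]
-- ===== Notes on version B (the rewrite author's own statement) =====
-- stated objective: simpler
-- what changed: Replaces the stateful while-loop that appends each point by stepping from the previous list element with a closed-form comprehension computing point i directly as start + sign*min(i, distance).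
import Mathlib
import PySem

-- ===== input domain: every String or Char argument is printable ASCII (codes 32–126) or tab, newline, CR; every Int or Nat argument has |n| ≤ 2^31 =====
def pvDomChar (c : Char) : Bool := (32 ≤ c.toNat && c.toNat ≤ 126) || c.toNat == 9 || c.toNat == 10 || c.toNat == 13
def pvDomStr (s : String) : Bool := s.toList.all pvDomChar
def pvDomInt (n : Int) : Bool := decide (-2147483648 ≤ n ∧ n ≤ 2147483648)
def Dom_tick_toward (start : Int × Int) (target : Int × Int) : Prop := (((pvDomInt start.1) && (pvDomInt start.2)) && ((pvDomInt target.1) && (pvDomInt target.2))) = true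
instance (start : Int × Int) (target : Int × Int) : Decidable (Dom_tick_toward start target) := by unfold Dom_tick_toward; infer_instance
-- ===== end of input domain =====

-- B replaces A's stateful step-from-previous loop with a closed-form comprehension (simpler).


-- ===== PORT A =====
-- while-loop with index i into the growing list, appending the successor of lst[i]
def tick_toward (start : Int × Int) (target : Int × Int) : List (Int × Int) :=
  let n : Int := max |target.1 - start.1| |target.2 - start.2|
  (PySem.List.pyRange 0 n 1).foldl
    (fun lst i =>
      let p := PySem.List.pyGetD lst i (0, 0)
      let num0 := if p.1 < target.1 then p.1 + 1 else if p.1 > target.1 then p.1 - 1 else p.1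
      let num1 := if p.2 < target.2 then p.2 + 1 else if p.2 > target.2 then p.2 - 1 else p.2
      lst ++ [(num0, num1)])
    [start]

-- ===== PORT B =====
def tick_toward_alt (start : Int × Int) (target : Int × Int) : List (Int × Int) :=
  let dx : Int := |target.1 - start.1|
  let dy : Int := |target.2 - start.2|
  let sx : Int := (if target.1 > start.1 then 1 else 0) - (if target.1 < start.1 then 1 else 0)
  let sy : Int := (if target.2 > start.2 then 1 else 0) - (if target.2 < start.2 then 1 else 0)
  let n : Int := max dx dy
  [start] ++ (PySem.List.pyRange 1 (n + 1) 1).map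
    (fun i => (start.1 + sx * min i dx, start.2 + sy * min i dy))

-- ===== PRECONDITION & SPEC =====
def Spec_tick_toward (start : Int × Int) (target : Int × Int) (out : List (Int × Int)) : Prop := out = tick_toward_alt start target
instance (start : Int × Int) (target : Int × Int) (out : List (Int × Int)) : Decidable (Spec_tick_toward start target out) := by unfold Spec_tick_toward; infer_instance

-- ===== CLAIM (what is proved, stated in full; the proofs are below) =====
def Claim_equal_tick_toward : Prop := ∀ (start : Int × Int) (target : Int × Int), Dom_tick_toward start target → Spec_tick_toward start target (tick_toward start target)

-- ===== LEMMAS AND PROOFS =====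

-- closed-form position of point number i (i : Int, 0 ≤ i intended)
def pvPt (start target : Int × Int) (i : Int) : Int × Int :=
  let dx : Int := |target.1 - start.1|
  let dy : Int := |target.2 - start.2|
  let sx : Int := (if target.1 > start.1 then 1 else 0) - (if target.1 < start.1 then 1 else 0)
  let sy : Int := (if target.2 > start.2 then 1 else 0) - (if target.2 < start.2 then 1 else 0)
  (start.1 + sx * min i dx, start.2 + sy * min i dy)

-- one coordinate step of A, from the closed form at i, is the closed form at i+1
theorem pvStep_coord (s t i : Int) :
    (let d := |t - s|
     let sg : Int := (if t > s then 1 else 0) - (if t < s then 1 else 0)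
     let c := s + sg * min i d
     (if c < t then c + 1 else if c > t then c - 1 else c) = s + sg * min (i + 1) d) := by
  rcases lt_trichotomy s t with h | h | h
  · have hd : |t - s| = t - s := abs_of_pos (by omega)
    simp only [hd, if_pos h, if_neg (by omega : ¬ t < s)]
    rcases le_or_gt (t - s) i with h2 | h2 <;> simp [min_def] <;> omega
  · subst h; simp
  · have hd : |t - s| = s - t := by rw [abs_of_neg (by omega)]; ring
    simp only [hd, if_neg (by omega : ¬ t > s), if_pos h]
    rcases le_or_gt (s - t) i with h2 | h2 <;> simp [min_def] <;> omega

theorem pvStep (start target : Int × Int) (i : Int) :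
    (let p := pvPt start target i
     let num0 := if p.1 < target.1 then p.1 + 1 else if p.1 > target.1 then p.1 - 1 else p.1
     let num1 := if p.2 < target.2 then p.2 + 1 else if p.2 > target.2 then p.2 - 1 else p.2
     ((num0, num1) : Int × Int)) = pvPt start target (i + 1) := by
  have h1 := pvStep_coord start.1 target.1 i
  have h2 := pvStep_coord start.2 target.2 i
  simp only [pvPt] at *
  exact Prod.ext h1 h2

-- invariant: after folding over range 0..m, the list is the closed forms of 0..m
theorem pvLoop (start target : Int × Int) (m : Nat) :
    (PySem.List.pyRange 0 (m : Int) 1).foldl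
      (fun lst i =>
        let p := PySem.List.pyGetD lst i (0, 0)
        let num0 := if p.1 < target.1 then p.1 + 1 else if p.1 > target.1 then p.1 - 1 else p.1
        let num1 := if p.2 < target.2 then p.2 + 1 else if p.2 > target.2 then p.2 - 1 else p.2
        lst ++ [(num0, num1)])
      [start]
    = (PySem.List.pyRange 0 ((m : Int) + 1) 1).map (pvPt start target) := by
  induction m with
  | zero =>
    have h0 : PySem.List.pyRange 0 1 1 = [0] := by
      simpa using PySem.List.pyRange_one_singleton (a := (0 : Int))
    simp [PySem.List.pyRange_one_eq_nil, h0, pvPt]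
  | succ k ih =>
    have hr : PySem.List.pyRange 0 ((k : Int) + 1) 1 =
        PySem.List.pyRange 0 (k : Int) 1 ++ [(k : Int)] :=
      PySem.List.pyRange_one_succ_right (by positivity)
    have hr2 : PySem.List.pyRange 0 (((k : Int) + 1) + 1) 1 =
        PySem.List.pyRange 0 ((k : Int) + 1) 1 ++ [(k : Int) + 1] :=
      PySem.List.pyRange_one_succ_right (by positivity)
    push_cast
    rw [hr, List.foldl_append, ih]
    simp only [List.foldl_cons, List.foldl_nil]
    have hget : PySem.List.pyGetD
        ((PySem.List.pyRange 0 ((k : Int) + 1) 1).map (pvPt start target)) (k : Int) (0, 0)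
        = pvPt start target (k : Int) :=
      PySem.List.pyGetD_map_pyRange_of_nonneg (pvPt start target)
        ((k : Int) + 1) (k : Int) (0, 0) (by positivity) (by omega)
    rw [hget, hr2, List.map_append]
    congr 1
    have := pvStep start target (k : Int)
    simp only [List.map_cons, List.map_nil]
    rw [← this]

theorem pvPt_zero (start target : Int × Int) : pvPt start target 0 = start := by
  simp [pvPt]

-- ===== VERDICT (by name: the statement is the Claim_ definition above) =====
theorem tick_toward_spec : Claim_equal_tick_toward := by
  intro start target _
  unfold Spec_tick_toward tick_toward tick_toward_alt
  set n : Int := max |target.1 - start.1| |target.2 - start.2| with hn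
  have hn0 : 0 ≤ n := le_max_of_le_left (abs_nonneg _)
  obtain ⟨m, hm⟩ : ∃ m : Nat, n = (m : Int) := ⟨n.toNat, (Int.toNat_of_nonneg hn0).symm⟩
  rw [hm]
  rw [pvLoop start target m]
  have hsplit : PySem.List.pyRange 0 ((m : Int) + 1) 1 =
      PySem.List.pyRange 0 1 1 ++ PySem.List.pyRange 1 ((m : Int) + 1) 1 :=
    PySem.List.pyRange_one_append 0 1 ((m : Int) + 1) (by omega) (by omega)
  rw [hsplit, List.map_append]
  have h0 : PySem.List.pyRange 0 1 1 = [0] := by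
    simpa using PySem.List.pyRange_one_singleton (a := (0 : Int))
  rw [h0]
  simp only [List.map_cons, List.map_nil, pvPt_zero]
  rw [← hm]
  simp [pvPt, hn]
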